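-- pv_equiv track=rewrite | github.com/samuelstevens/sentence-editing-interpretability | paper/interpret/attention.py | get_word_ends_from_tokens
-- ===== SOURCE A (Python) =====
-- from typing import List, NamedTuple
--
-- def get_word_ends_from_tokens(tokens: List[str], words: List[str]) -> List[str]:
--     assert tokens[0] == words[0], f"{tokens[0]} != {words[0]}"
--     assert tokens[-1] == words[-1]
--
--     word_ends = []
--
--     word_i = 0
--     token_i = 0
--     while word_i < len(words) and token_i < len(tokens):
--         if words[word_i].lower().endswith(tokens[token_i].lower().strip()):
--             word_ends.append(tokens[token_i])
--             word_i += 1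
--
--         token_i += 1
--
--     return word_ends
-- ===== SOURCE B (Python) =====
-- def get_word_ends_from_tokens(tokens, words):
--     assert tokens[0] == words[0], f"{tokens[0]} != {words[0]}"
--     assert tokens[-1] == words[-1]
--
--     # remaining words kept as a stack (reversed), popped when matched
--     stack = list(reversed(words))
--     word_ends = []
--     for token in tokens:
--         if not stack:
--             break
--         if stack[-1].lower().endswith(token.lower().strip()):
--             stack.pop()
--             word_ends.append(token)
--     return word_ends
-- ===== Notes on version B (the rewrite author's own statement) =====
-- stated objective: alternative
-- what changed: Replaced A's index-based two-pointer while-loop by a direct for-each over tokens that maintains the still-unmatched words as a reversed stack, popping a word on each suffix match and breaking when the stack empties.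
import Mathlib
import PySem

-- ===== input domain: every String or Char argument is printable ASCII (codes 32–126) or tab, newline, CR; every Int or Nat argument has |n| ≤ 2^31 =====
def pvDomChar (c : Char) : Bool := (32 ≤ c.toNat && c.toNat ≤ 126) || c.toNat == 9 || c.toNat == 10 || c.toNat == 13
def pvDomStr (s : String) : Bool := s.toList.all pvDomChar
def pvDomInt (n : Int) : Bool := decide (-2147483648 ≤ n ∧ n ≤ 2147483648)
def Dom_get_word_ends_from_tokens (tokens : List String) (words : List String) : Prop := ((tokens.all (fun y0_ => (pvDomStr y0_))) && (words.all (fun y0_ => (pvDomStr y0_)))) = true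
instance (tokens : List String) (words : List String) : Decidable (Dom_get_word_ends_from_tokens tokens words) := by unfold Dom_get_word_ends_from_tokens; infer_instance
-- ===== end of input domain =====

-- B replaces A's index-based two-pointer while-loop by a for-each over the tokens that pops
-- the still-unmatched words off a reversed stack; same values, no speed claim (alternative).

-- ===== PORT A =====
-- the match test: words[word_i].lower().endswith(tokens[token_i].lower().strip())
def pvEndsMatchA (w t : String) : Bool :=
  PySem.Str.endswith (PySem.Str.lower w) (PySem.Str.strip (PySem.Str.lower t))

-- A's while-loop: one step per token, word index advances on a match
def pvLoopA (tokens words : List String) (word_i token_i : Nat) (acc : List String) :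
    List String :=
  if h : word_i < words.length ∧ token_i < tokens.length then
    let t := tokens.getD token_i ""
    if pvEndsMatchA (words.getD word_i "") t then
      pvLoopA tokens words (word_i + 1) (token_i + 1) (acc ++ [t])
    else
      pvLoopA tokens words word_i (token_i + 1) acc
  else acc
termination_by tokens.length - token_i
decreasing_by all_goals omega

def get_word_ends_from_tokens (tokens : List String) (words : List String) : List String :=
  pvLoopA tokens words 0 0 []

-- ===== PORT B =====
-- B's for-loop over tokens, threading the stack of remaining words and the output
def pvLoopB (stack acc : List String) (tokens : List String) : List String :=
  match tokens with
  | [] => acc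
  | t :: ts =>
    if stack = [] then acc
    else if PySem.Str.endswith (PySem.Str.lower (stack.getLastD ""))
        (PySem.Str.strip (PySem.Str.lower t)) then
      pvLoopB stack.dropLast (acc ++ [t]) ts
    else pvLoopB stack acc ts

def get_word_ends_from_tokens_alt (tokens : List String) (words : List String) : List String :=
  pvLoopB words.reverse [] tokens

-- ===== PRECONDITION & SPEC =====
-- Pre_ excludes exactly the inputs where A raises: empty tokens/words (IndexError on
-- tokens[0]/words[0]/[-1]) and first/last mismatches (the two asserts raise AssertionError).
def Pre_get_word_ends_from_tokens (tokens : List String) (words : List String) : Prop :=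
  tokens ≠ [] ∧ words ≠ [] ∧ tokens.headD "" = words.headD "" ∧
    tokens.getLastD "" = words.getLastD ""
instance (tokens : List String) (words : List String) :
    Decidable (Pre_get_word_ends_from_tokens tokens words) := by
  unfold Pre_get_word_ends_from_tokens; infer_instance

def pvWitness_get_word_ends_from_tokens : List String × List String :=
  (["a", "b", "c"], ["a", "bb", "c"])

def Spec_get_word_ends_from_tokens (tokens : List String) (words : List String) (out : List String) : Prop := out = get_word_ends_from_tokens_alt tokens words
instance (tokens : List String) (words : List String) (out : List String) : Decidable (Spec_get_word_ends_from_tokens tokens words out) := by unfold Spec_get_word_ends_from_tokens; infer_instance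

-- ===== CLAIM (what is proved, stated in full; the proofs are below) =====
def Claim_equal_get_word_ends_from_tokens : Prop := ∀ (tokens : List String) (words : List String), Dom_get_word_ends_from_tokens tokens words → Pre_get_word_ends_from_tokens tokens words → Spec_get_word_ends_from_tokens tokens words (get_word_ends_from_tokens tokens words)

-- ===== LEMMAS AND PROOFS =====

lemma pvLoopA_eq_loopB (tokens words : List String) :
    ∀ (word_i token_i : Nat) (acc : List String),
      pvLoopA tokens words word_i token_i acc
        = pvLoopB ((words.drop word_i).reverse) acc (tokens.drop token_i) := by
  intro word_i token_i acc
  by_cases ht : token_i < tokens.length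
  · have hdt : tokens.drop token_i
        = tokens.getD token_i "" :: tokens.drop (token_i + 1) := by
      rw [List.drop_eq_getElem_cons ht]
      simp [List.getD, List.getElem?_eq_getElem ht]
    by_cases hw : word_i < words.length
    · have hwd : words.drop word_i ≠ [] := by
        simp only [ne_eq, List.drop_eq_nil_iff]; omega
      have hlast : ((words.drop word_i).reverse).getLastD "" = words.getD word_i "" := by
        rw [List.getLastD_eq_getLast?, List.getLast?_reverse]
        cases hh : words.drop word_i with
        | nil => exact absurd hh hwd
        | cons w ws =>
          have h0 := congrArg List.head? hh
          rw [List.head?_drop] at h0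
          simp [List.getD, h0]
      have hdrop1 : ((words.drop word_i).reverse).dropLast
          = (words.drop (word_i + 1)).reverse := by
        cases hh : words.drop word_i with
        | nil => exact absurd hh hwd
        | cons w ws =>
          have ht1 : words.drop (word_i + 1) = ws := by
            rw [← List.tail_drop, hh, List.tail_cons]
          rw [List.reverse_cons, List.dropLast_concat, ht1]
      rw [pvLoopA, hdt, pvLoopB, dif_pos (And.intro hw ht)]
      have hne : ¬ ((words.drop word_i).reverse = []) := by simp [hwd]
      rw [if_neg hne, hlast]
      by_cases hm : pvEndsMatchA (words.getD word_i "") (tokens.getD token_i "")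
      · rw [if_pos hm, if_pos (by simpa [pvEndsMatchA] using hm),
          pvLoopA_eq_loopB tokens words (word_i + 1) (token_i + 1) (acc ++ [_]), hdrop1]
      · rw [if_neg hm, if_neg (by simpa [pvEndsMatchA] using hm),
          pvLoopA_eq_loopB tokens words word_i (token_i + 1) acc]
    · have hwd : words.drop word_i = [] := List.drop_eq_nil_of_le (by omega)
      rw [pvLoopA, hwd, hdt, pvLoopB]
      simp [hw]
  · have hdt : tokens.drop token_i = [] := List.drop_eq_nil_of_le (by omega)
    rw [pvLoopA, hdt, pvLoopB]
    simp [ht]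
termination_by word_i token_i acc => tokens.length - token_i
decreasing_by all_goals omega

-- ===== VERDICT (by name: the statement is the Claim_ definition above) =====
theorem get_word_ends_from_tokens_spec : Claim_equal_get_word_ends_from_tokens := by
  intro tokens words _ _
  unfold Spec_get_word_ends_from_tokens get_word_ends_from_tokens get_word_ends_from_tokens_alt
  simpa using pvLoopA_eq_loopB tokens words 0 0 []
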